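-- pv_equiv track=rewrite | github.com/Tentoe/AOC2021 | day12.py | part2
-- ===== SOURCE A (Python) =====
-- from collections import Counter
--
-- def part2(path, b):
--     count = Counter(path + [b])
--     lower2 = 0
--     for key in count.keys():
--         if key in ['start', 'end'] and count[key] > 1:
--             return False
--         if key.islower() and count[key] > 1:
--             if count[key] < 3:
--                 lower2 += 1
--             else:
--                 return False
--
--     return lower2 <= 1
-- ===== SOURCE B (Python) =====
-- def part2(path, b):
--     # Sort the small caves, then scan consecutive runs: a run of length >= 3,
--     # or a run of length 2 for 'start'/'end', is illegal; otherwise at most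
--     # one run of length 2 is allowed.  No hash counting at all.
--     caves = sorted(c for c in path + [b] if c.islower())
--     doubles = 0
--     i = 0
--     n = len(caves)
--     while i < n:
--         j = i + 1
--         while j < n and caves[j] == caves[i]:
--             j += 1
--         run = j - i
--         if run >= 3:
--             return False
--         if run == 2:
--             if caves[i] == 'start' or caves[i] == 'end':
--                 return False
--             doubles += 1
--         i = j
--     return doubles <= 1
-- ===== Notes on version B (the rewrite author's own statement) =====
-- stated objective: alternative
-- what changed: Replaces the Counter-then-scan-keys strategy (build a hash multiset of all caves, then validate each distinct key against its count) with sort-then-scan: sort the small caves and validate the lengths of consecutive equal runs, with no counting structure at all.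
import Mathlib
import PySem

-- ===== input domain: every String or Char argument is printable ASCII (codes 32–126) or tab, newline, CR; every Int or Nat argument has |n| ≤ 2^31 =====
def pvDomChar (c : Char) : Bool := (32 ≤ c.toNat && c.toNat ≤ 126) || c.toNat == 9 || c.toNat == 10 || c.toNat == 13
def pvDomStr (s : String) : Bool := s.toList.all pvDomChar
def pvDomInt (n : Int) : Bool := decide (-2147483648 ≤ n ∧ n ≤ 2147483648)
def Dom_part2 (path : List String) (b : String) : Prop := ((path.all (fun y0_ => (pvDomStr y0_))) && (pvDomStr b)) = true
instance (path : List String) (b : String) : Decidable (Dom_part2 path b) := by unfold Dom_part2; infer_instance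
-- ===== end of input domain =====

-- B replaces A's Counter-then-scan-keys with sort-then-scan over consecutive runs
-- (a different algorithm of similar cost; not claimed faster).


-- Python str.islower(): at least one cased character and no uppercase one.
-- Exact on the ASCII domain, where the cased characters are exactly a-z and A-Z.
def strIsLower (s : String) : Bool :=
  s.toList.any PySem.Str.islower && s.toList.all (fun c => !(PySem.Str.isupper c))

-- ===== PORT A =====
-- the 'for key in count.keys()' loop with its early returns and the lower2 accumulator
def part2Loop (count : PySem.Dict String Int) : List String → Int → Bool
  | [], lower2 => decide (lower2 ≤ 1)
  | key :: rest, lower2 =>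
    if (key == "start" || key == "end") && decide (1 < count.getD key 0) then false
    else if strIsLower key && decide (1 < count.getD key 0) then
      if decide (count.getD key 0 < 3) then part2Loop count rest (lower2 + 1)
      else false
    else part2Loop count rest lower2

def part2 (path : List String) (b : String) : Bool :=
  let count := PySem.Dict.counter (path ++ [b])
  part2Loop count count.keys 0

-- ===== PORT B =====
-- the outer 'while i < n' loop of Source B, as recursion on the suffix caves[i:];
-- the inner 'while j < n and caves[j] == caves[i]' scan is the takeWhile/dropWhile split
def scanRuns : List String → Int → Bool
  | [], doubles => decide (doubles ≤ 1)
  | c :: rest, doubles =>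
    let t := rest.takeWhile (fun x => x == c)
    let r := rest.dropWhile (fun x => x == c)
    let run := 1 + t.length
    if 3 ≤ run then false
    else if run = 2 then
      if c == "start" || c == "end" then false
      else scanRuns r (doubles + 1)
    else scanRuns r doubles
termination_by m _ => m.length
decreasing_by
  · have := List.length_dropWhile_le (fun x => x == c) rest
    simp only [List.length_cons]; omega
  · have := List.length_dropWhile_le (fun x => x == c) rest
    simp only [List.length_cons]; omega

def part2_alt (path : List String) (b : String) : Bool :=
  let caves := PySem.List.sorted ((path ++ [b]).filter strIsLower) (fun x => x) false
  scanRuns caves 0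

-- ===== PRECONDITION & SPEC =====
def Spec_part2 (path : List String) (b : String) (out : Bool) : Prop := out = part2_alt path b
instance (path : List String) (b : String) (out : Bool) : Decidable (Spec_part2 path b out) := by unfold Spec_part2; infer_instance

-- ===== CLAIM (what is proved, stated in full; the proofs are below) =====
def Claim_equal_part2 : Prop := ∀ (path : List String) (b : String), Dom_part2 path b → Spec_part2 path b (part2 path b)

-- ===== LEMMAS AND PROOFS =====

-- a cave k is illegal given the full list l
def badP (l : List String) (k : String) : Bool :=
  ((k == "start" || k == "end") && decide (1 < l.count k)) ||
  (strIsLower k && decide (3 ≤ l.count k))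

-- a small cave visited exactly twice
def dblP (l : List String) (k : String) : Bool := strIsLower k && decide (l.count k = 2)

-- the common characterization both ports are proved equal to
def specFn (l : List String) : Bool :=
  !((PySem.Set.ofList l).any (badP l)) &&
  decide ((((PySem.Set.ofList l).countP (dblP l) : Nat) : Int) ≤ 1)

-- ----- A side -----
lemma part2Loop_eq (count : PySem.Dict String Int) (keys : List String) :
    ∀ lower2 : Int, part2Loop count keys lower2 =
      ((!keys.any (fun k => ((k == "start" || k == "end") && decide (1 < count.getD k 0)) ||
          (strIsLower k && decide (1 < count.getD k 0) && !decide (count.getD k 0 < 3)))) &&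
       decide (lower2 + ((keys.countP (fun k => strIsLower k && decide (1 < count.getD k 0) &&
          decide (count.getD k 0 < 3)) : Nat) : Int) ≤ 1)) := by
  induction keys with
  | nil => intro lower2; simp [part2Loop]
  | cons key rest ih =>
    intro lower2
    simp only [part2Loop]
    by_cases h1 : ((key == "start" || key == "end") && decide (1 < count.getD key 0)) = true
    · simp [h1]
    · by_cases h2 : (strIsLower key && decide (1 < count.getD key 0)) = true
      · by_cases h3 : decide (count.getD key 0 < 3) = true
        · rw [if_neg h1, if_pos h2, if_pos h3, ih]
          simp only [List.any_cons, List.countP_cons]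
          have hb : (((key == "start" || key == "end") && decide (1 < count.getD key 0)) ||
              (strIsLower key && decide (1 < count.getD key 0) && !decide (count.getD key 0 < 3))) = false := by
            simp only [Bool.or_eq_false_iff]
            exact ⟨by simpa using h1, by simp [h2, h3]⟩
          have hd : (strIsLower key && decide (1 < count.getD key 0) &&
              decide (count.getD key 0 < 3)) = true := by simp [h2, h3]
          rw [hb, hd]
          simp only [Bool.false_or]
          congr 1
          rw [decide_eq_decide]
          push_cast
          omega
        · rw [if_neg h1, if_pos h2, if_neg h3]
          simp [h1, h2, h3]
      · rw [if_neg h1, if_neg h2, ih]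
        have hb : (((key == "start" || key == "end") && decide (1 < count.getD key 0)) ||
            (strIsLower key && decide (1 < count.getD key 0) && !decide (count.getD key 0 < 3))) = false := by
          simp only [Bool.or_eq_false_iff]
          constructor
          · exact Bool.not_eq_true _ ▸ (by simpa using h1)
          · cases hh : (strIsLower key && decide (1 < count.getD key 0)) with
            | false => simp
            | true => exact absurd hh h2
        have hd : (strIsLower key && decide (1 < count.getD key 0) && decide (count.getD key 0 < 3)) = false := by
          cases hh : (strIsLower key && decide (1 < count.getD key 0)) with
          | false => simp
          | true => exact absurd hh h2
        simp [List.any_cons, hb, hd]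

lemma part2_eq_specFn (path : List String) (b : String) :
    part2 path b = specFn (path ++ [b]) := by
  unfold part2 specFn
  rw [part2Loop_eq, PySem.Dict.keys_counter]
  have hbad : ∀ k ∈ PySem.Set.ofList (path ++ [b]),
      (((k == "start" || k == "end") && decide (1 < (PySem.Dict.counter (path ++ [b])).getD k 0)) ||
       (strIsLower k && decide (1 < (PySem.Dict.counter (path ++ [b])).getD k 0) &&
        !decide ((PySem.Dict.counter (path ++ [b])).getD k 0 < 3))) = badP (path ++ [b]) k := by
    intro k _
    unfold badP
    rw [PySem.Dict.getD_counter]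
    generalize List.count k (path ++ [b]) = m
    have e1 : decide (1 < ((m : Nat) : Int)) = decide (1 < m) := by
      rw [decide_eq_decide]; omega
    have e2 : (decide (1 < ((m : Nat) : Int)) && !decide (((m : Nat) : Int) < 3)) =
        decide (3 ≤ m) := by
      rw [Bool.eq_iff_iff]
      simp only [Bool.and_eq_true, Bool.not_eq_true', decide_eq_true_eq, decide_eq_false_iff_not]
      omega
    rw [Bool.and_assoc, e2, e1]
  have hdbl : ∀ k ∈ PySem.Set.ofList (path ++ [b]),
      ((strIsLower k && decide (1 < (PySem.Dict.counter (path ++ [b])).getD k 0) &&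
        decide ((PySem.Dict.counter (path ++ [b])).getD k 0 < 3)) = true ↔ dblP (path ++ [b]) k = true) := by
    intro k _
    unfold dblP
    rw [PySem.Dict.getD_counter]
    cases hs : strIsLower k
    · simp
    · simp only [Bool.true_and, Bool.and_eq_true, decide_eq_true_eq]
      constructor
      · rintro ⟨hl, hr⟩; omega
      · intro h; omega
  rw [PySem.List.any_congr_mem hbad, List.countP_congr hdbl]
  simp

-- ----- B side -----
-- illegal / double predicates over the sorted small-cave list m
def badS (m : List String) (k : String) : Bool :=
  decide (3 ≤ m.count k) || ((k == "start" || k == "end") && decide (2 ≤ m.count k))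

def dblS (m : List String) (k : String) : Bool := decide (m.count k = 2)

def altSpec (m : List String) (d : Int) : Bool :=
  !((PySem.Set.ofList m).any (badS m)) &&
  decide (d + (((PySem.Set.ofList m).countP (dblS m) : Nat) : Int) ≤ 1)

-- any over the distinct elements, transported along M = {c} ∪ r when p c = false
lemma any_ofList_split (M r : List String) (c : String) (p q : String → Bool)
    (hmem : ∀ x, x ∈ M ↔ x = c ∨ x ∈ r) (hcr : c ∉ r)
    (hpq : ∀ k, k ≠ c → p k = q k) (hpc : p c = false) :
    (PySem.Set.ofList M).any p = (PySem.Set.ofList r).any q := by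
  rw [Bool.eq_iff_iff, List.any_eq_true, List.any_eq_true]
  constructor
  · rintro ⟨k, hk, hpk⟩
    rw [PySem.Set.mem_ofList] at hk
    rcases (hmem k).mp hk with rfl | hk
    · rw [hpc] at hpk; cases hpk
    · exact ⟨k, (PySem.Set.mem_ofList _ _).mpr hk,
        (hpq k (by rintro rfl; exact hcr hk)) ▸ hpk⟩
  · rintro ⟨k, hk, hqk⟩
    rw [PySem.Set.mem_ofList] at hk
    exact ⟨k, (PySem.Set.mem_ofList _ _).mpr ((hmem k).mpr (Or.inr hk)),
      (hpq k (by rintro rfl; exact hcr hk)).symm ▸ hqk⟩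

-- countP over the distinct elements, transported along M = {c} ∪ r
lemma countP_ofList_split (M r : List String) (c : String) (p q : String → Bool)
    (hmem : ∀ x, x ∈ M ↔ x = c ∨ x ∈ r) (hcr : c ∉ r)
    (hpq : ∀ k, k ≠ c → p k = q k) :
    (PySem.Set.ofList M).countP p =
      (PySem.Set.ofList r).countP q + (if p c then 1 else 0) := by
  have hfu : ((PySem.Set.ofList M).filter p).Nodup := (PySem.Set.nodup_ofList M).filter _
  have hfv : ((PySem.Set.ofList r).filter q).Nodup := (PySem.Set.nodup_ofList r).filter _
  rw [List.countP_eq_length_filter, List.countP_eq_length_filter,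
    ← List.toFinset_card_of_nodup hfu, ← List.toFinset_card_of_nodup hfv]
  by_cases hpc : p c = true
  · have hset : ((PySem.Set.ofList M).filter p).toFinset =
        insert c ((PySem.Set.ofList r).filter q).toFinset := by
      ext k
      simp only [List.mem_toFinset, List.mem_filter, PySem.Set.mem_ofList, Finset.mem_insert,
        hmem]
      constructor
      · rintro ⟨rfl | hk, hpk⟩
        · exact Or.inl rfl
        · exact Or.inr ⟨hk, (hpq k (by rintro rfl; exact hcr hk)) ▸ hpk⟩
      · rintro (rfl | ⟨hk, hqk⟩)
        · exact ⟨Or.inl rfl, hpc⟩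
        · exact ⟨Or.inr hk, (hpq k (by rintro rfl; exact hcr hk)).symm ▸ hqk⟩
    rw [hset, Finset.card_insert_of_notMem, hpc, if_pos rfl]
    simp only [List.mem_toFinset, List.mem_filter, PySem.Set.mem_ofList]
    rintro ⟨hk, -⟩
    exact hcr hk
  · have hset : ((PySem.Set.ofList M).filter p).toFinset =
        ((PySem.Set.ofList r).filter q).toFinset := by
      ext k
      simp only [List.mem_toFinset, List.mem_filter, PySem.Set.mem_ofList, hmem]
      constructor
      · rintro ⟨rfl | hk, hpk⟩
        · exact absurd hpk hpc
        · exact ⟨hk, (hpq k (by rintro rfl; exact hcr hk)) ▸ hpk⟩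
      · rintro ⟨hk, hqk⟩
        exact ⟨Or.inr hk, (hpq k (by rintro rfl; exact hcr hk)).symm ▸ hqk⟩
    rw [hset, if_neg hpc]
    simp

lemma dropWhile_head_false {a : Type} (p : a → Bool) :
    ∀ (l : List a) (h : a) (r' : List a), l.dropWhile p = h :: r' → p h = false := by
  intro l
  induction l with
  | nil => intro h r' hl; simp [List.dropWhile] at hl
  | cons x xs ih =>
    intro h r' hl
    by_cases hpx : p x = true
    · rw [List.dropWhile_cons_of_pos hpx] at hl
      exact ih h r' hl
    · rw [List.dropWhile_cons_of_neg hpx] at hl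
      rw [← (List.cons.injEq ..).mp hl |>.1]
      exact Bool.not_eq_true _ ▸ hpx

lemma scanRuns_eq (n : Nat) :
    ∀ m : List String, m.length ≤ n → m.Pairwise (· ≤ ·) →
      ∀ d : Int, scanRuns m d = altSpec m d := by
  induction n with
  | zero =>
    intro m hm _ d
    have hnil : m = [] := List.length_eq_zero_iff.mp (Nat.le_zero.mp hm)
    subst hnil
    simp [scanRuns, altSpec, PySem.Set.ofList]
  | succ n ih =>
    intro m hm hp d
    cases m with
    | nil => simp [scanRuns, altSpec, PySem.Set.ofList]
    | cons c rest =>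
      have hc : ∀ x ∈ rest, c ≤ x := (List.pairwise_cons.mp hp).1
      have hrp : rest.Pairwise (· ≤ ·) := (List.pairwise_cons.mp hp).2
      have htr : rest.takeWhile (fun x => x == c) ++ rest.dropWhile (fun x => x == c) = rest :=
        List.takeWhile_append_dropWhile
      have ht : ∀ x ∈ rest.takeWhile (fun x => x == c), x = c := by
        intro x hx
        have hb := List.mem_takeWhile_imp (p := fun y => y == c) hx
        exact eq_of_beq hb
      have hrsub : (rest.dropWhile (fun x => x == c)).Sublist rest := by
        conv_rhs => rw [← htr]
        exact List.sublist_append_right ..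
      have hrpair : (rest.dropWhile (fun x => x == c)).Pairwise (· ≤ ·) := hrp.sublist hrsub
      have hcr : c ∉ rest.dropWhile (fun x => x == c) := by
        intro hcmem
        cases hre : rest.dropWhile (fun x => x == c) with
        | nil => rw [hre] at hcmem; cases hcmem
        | cons h r' =>
          have hh : (h == c) = false := dropWhile_head_false _ rest h r' hre
          have hhc : h ≠ c := by simpa using hh
          have hch : c ≤ h := hc h (hrsub.mem (by rw [hre]; exact List.mem_cons_self))
          rw [hre] at hcmem
          rcases List.mem_cons.mp hcmem with he | hcmem'
          · exact hhc he.symm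
          · have hhc2 : h ≤ c := (List.pairwise_cons.mp (hre ▸ hrpair)).1 c hcmem'
            exact hhc (le_antisymm hhc2 hch)
      have hmem : ∀ x, x ∈ c :: rest ↔ x = c ∨ x ∈ rest.dropWhile (fun x => x == c) := by
        intro x
        conv_lhs => rw [← htr]
        simp only [List.mem_cons, List.mem_append]
        constructor
        · rintro (rfl | hx | hx)
          · exact Or.inl rfl
          · exact Or.inl (ht x hx)
          · exact Or.inr hx
        · rintro (rfl | hx)
          · exact Or.inl rfl
          · exact Or.inr (Or.inr hx)
      have hcount_c : (c :: rest).count c = 1 + (rest.takeWhile (fun x => x == c)).length := by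
        conv_lhs => rw [← htr]
        rw [List.count_cons, List.count_append]
        have h1 : (rest.takeWhile (fun x => x == c)).count c =
            (rest.takeWhile (fun x => x == c)).length :=
          List.count_eq_length.mpr (fun b hb => (ht b hb).symm)
        have h2 : (rest.dropWhile (fun x => x == c)).count c = 0 := List.count_eq_zero.mpr hcr
        rw [h1, h2]
        simp
        omega
      have hcount_ne : ∀ k, k ≠ c →
          (c :: rest).count k = (rest.dropWhile (fun x => x == c)).count k := by
        intro k hk
        conv_lhs => rw [← htr]
        rw [List.count_cons, List.count_append]
        have h1 : (rest.takeWhile (fun x => x == c)).count k = 0 :=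
          List.count_eq_zero.mpr (fun hkt => hk (ht k hkt))
        rw [h1]
        simp [Ne.symm hk]
      have hrlen : (rest.dropWhile (fun x => x == c)).length ≤ n := by
        have := List.length_dropWhile_le (fun x => x == c) rest
        simp only [List.length_cons] at hm
        omega
      have hcmemM : c ∈ PySem.Set.ofList (c :: rest) :=
        (PySem.Set.mem_ofList _ _).mpr (List.mem_cons_self)
      by_cases h3 : 3 ≤ 1 + (rest.takeWhile (fun x => x == c)).length
      · -- a run of length ≥ 3: both sides fail
        have hbad : badS (c :: rest) c = true := by
          unfold badS
          rw [hcount_c]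
          simp
          omega
        have hany : (PySem.Set.ofList (c :: rest)).any (badS (c :: rest)) = true :=
          List.any_eq_true.mpr ⟨c, hcmemM, hbad⟩
        rw [scanRuns]
        simp only [if_pos h3]
        unfold altSpec
        rw [hany]
        simp
      · by_cases h2 : 1 + (rest.takeWhile (fun x => x == c)).length = 2
        · by_cases hse : (c == "start" || c == "end") = true
          · -- 'start'/'end' visited twice: both sides fail
            have hbad : badS (c :: rest) c = true := by
              unfold badS
              rw [hcount_c, h2, hse]
              simp
            have hany : (PySem.Set.ofList (c :: rest)).any (badS (c :: rest)) = true :=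
              List.any_eq_true.mpr ⟨c, hcmemM, hbad⟩
            rw [scanRuns]
            simp only [if_neg h3, if_pos h2, if_pos hse]
            unfold altSpec
            rw [hany]
            simp
          · -- a new double
            have hse' : (c == "start" || c == "end") = false := by simpa using hse
            have hbadc : badS (c :: rest) c = false := by
              unfold badS
              rw [hcount_c, h2, hse']
              simp
            have hpq : ∀ k, k ≠ c →
                badS (c :: rest) k = badS (rest.dropWhile (fun x => x == c)) k := by
              intro k hk
              unfold badS
              rw [hcount_ne k hk]
            have hdq : ∀ k, k ≠ c →
                dblS (c :: rest) k = dblS (rest.dropWhile (fun x => x == c)) k := by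
              intro k hk
              unfold dblS
              rw [hcount_ne k hk]
            have hdc : dblS (c :: rest) c = true := by
              unfold dblS
              rw [hcount_c, h2]
              simp
            rw [scanRuns]
            simp only [if_neg h3, if_pos h2, if_neg hse]
            rw [ih _ hrlen hrpair (d + 1)]
            unfold altSpec
            rw [any_ofList_split (c :: rest) _ c _ _ hmem hcr hpq hbadc,
              countP_ofList_split (c :: rest) _ c _ _ hmem hcr hdq, hdc, if_pos rfl]
            congr 1
            rw [decide_eq_decide]
            push_cast
            omega
        · -- a run of length 1
          have h1 : (rest.takeWhile (fun x => x == c)).length = 0 := by omega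
          have hbadc : badS (c :: rest) c = false := by
            unfold badS
            rw [hcount_c, h1]
            simp
          have hdc : dblS (c :: rest) c = false := by
            unfold dblS
            rw [hcount_c, h1]
            simp
          have hpq : ∀ k, k ≠ c →
              badS (c :: rest) k = badS (rest.dropWhile (fun x => x == c)) k := by
            intro k hk
            unfold badS
            rw [hcount_ne k hk]
          have hdq : ∀ k, k ≠ c →
              dblS (c :: rest) k = dblS (rest.dropWhile (fun x => x == c)) k := by
            intro k hk
            unfold dblS
            rw [hcount_ne k hk]
          rw [scanRuns]
          simp only [if_neg h3, if_neg h2]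
          rw [ih _ hrlen hrpair d]
          unfold altSpec
          rw [any_ofList_split (c :: rest) _ c _ _ hmem hcr hpq hbadc,
            countP_ofList_split (c :: rest) _ c _ _ hmem hcr hdq, hdc, if_neg (by simp)]
          simp

-- transporting any / countP between the full list and the sorted small-cave list
lemma any_ofList_iff (u v : List String) (p q : String → Bool)
    (h : ∀ k, (k ∈ u ∧ p k = true) ↔ (k ∈ v ∧ q k = true)) :
    (PySem.Set.ofList u).any p = (PySem.Set.ofList v).any q := by
  rw [Bool.eq_iff_iff, List.any_eq_true, List.any_eq_true]
  constructor
  · rintro ⟨k, hk, hpk⟩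
    obtain ⟨hk2, hq⟩ := (h k).mp ⟨(PySem.Set.mem_ofList _ _).mp hk, hpk⟩
    exact ⟨k, (PySem.Set.mem_ofList _ _).mpr hk2, hq⟩
  · rintro ⟨k, hk, hqk⟩
    obtain ⟨hk2, hp⟩ := (h k).mpr ⟨(PySem.Set.mem_ofList _ _).mp hk, hqk⟩
    exact ⟨k, (PySem.Set.mem_ofList _ _).mpr hk2, hp⟩

lemma countP_ofList_iff (u v : List String) (p q : String → Bool)
    (h : ∀ k, (k ∈ u ∧ p k = true) ↔ (k ∈ v ∧ q k = true)) :
    (PySem.Set.ofList u).countP p = (PySem.Set.ofList v).countP q := by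
  have hfu : ((PySem.Set.ofList u).filter p).Nodup := (PySem.Set.nodup_ofList u).filter _
  have hfv : ((PySem.Set.ofList v).filter q).Nodup := (PySem.Set.nodup_ofList v).filter _
  rw [List.countP_eq_length_filter, List.countP_eq_length_filter,
    ← List.toFinset_card_of_nodup hfu, ← List.toFinset_card_of_nodup hfv]
  congr 1
  ext k
  simp only [List.mem_toFinset, List.mem_filter, PySem.Set.mem_ofList]
  exact h k

lemma part2_alt_eq_specFn (path : List String) (b : String) :
    part2_alt path b = specFn (path ++ [b]) := by
  unfold part2_alt
  set l := path ++ [b] with hl_def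
  set f := l.filter strIsLower with hf_def
  set m := PySem.List.sorted f (fun x => x) false with hm_def
  have hperm : m.Perm f := PySem.List.sorted_perm f (fun x => x) false
  have hpair : m.Pairwise (· ≤ ·) := PySem.List.sorted_pairwise f (fun x => x)
  have hmemm : ∀ k, k ∈ m ↔ (k ∈ l ∧ strIsLower k = true) := by
    intro k
    rw [hperm.mem_iff, hf_def, List.mem_filter]
  have hcnt : ∀ k, strIsLower k = true → m.count k = l.count k := by
    intro k hk
    rw [hperm.count_eq, hf_def, List.count_filter hk]
  have hlow_se : ∀ k : String, (k == "start" || k == "end") = true → strIsLower k = true := by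
    intro k hk
    rcases Bool.or_eq_true_iff.mp hk with h | h
    · rw [eq_of_beq h]; decide
    · rw [eq_of_beq h]; decide
  have hbadiff : ∀ k, (k ∈ l ∧ badP l k = true) ↔ (k ∈ m ∧ badS m k = true) := by
    intro k
    constructor
    · rintro ⟨hkl, hb⟩
      unfold badP at hb
      have hlow : strIsLower k = true := by
        rcases Bool.or_eq_true_iff.mp hb with h | h
        · exact hlow_se k (Bool.and_eq_true_iff.mp h).1
        · exact (Bool.and_eq_true_iff.mp h).1
      refine ⟨(hmemm k).mpr ⟨hkl, hlow⟩, ?_⟩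
      unfold badS
      rw [hcnt k hlow]
      rcases Bool.or_eq_true_iff.mp hb with h | h
      · obtain ⟨hse, hgt⟩ := Bool.and_eq_true_iff.mp h
        rw [Bool.or_eq_true_iff]
        right
        rw [hse]
        simp only [Bool.true_and, decide_eq_true_eq] at hgt ⊢
        omega
      · obtain ⟨-, hge⟩ := Bool.and_eq_true_iff.mp h
        rw [Bool.or_eq_true_iff]
        left
        exact hge
    · rintro ⟨hkm, hb⟩
      obtain ⟨hkl, hlow⟩ := (hmemm k).mp hkm
      refine ⟨hkl, ?_⟩
      unfold badS at hb
      rw [hcnt k hlow] at hb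
      unfold badP
      rcases Bool.or_eq_true_iff.mp hb with h | h
      · rw [Bool.or_eq_true_iff]
        right
        rw [hlow]
        simpa using h
      · obtain ⟨hse, hge⟩ := Bool.and_eq_true_iff.mp h
        rw [Bool.or_eq_true_iff]
        left
        rw [hse]
        simp only [Bool.true_and, decide_eq_true_eq] at hge ⊢
        omega
  have hdbliff : ∀ k, (k ∈ l ∧ dblP l k = true) ↔ (k ∈ m ∧ dblS m k = true) := by
    intro k
    constructor
    · rintro ⟨hkl, hd⟩
      obtain ⟨hlow, hcnt2⟩ := Bool.and_eq_true_iff.mp hd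
      exact ⟨(hmemm k).mpr ⟨hkl, hlow⟩, by unfold dblS; rw [hcnt k hlow]; exact hcnt2⟩
    · rintro ⟨hkm, hd⟩
      obtain ⟨hkl, hlow⟩ := (hmemm k).mp hkm
      unfold dblS at hd
      rw [hcnt k hlow] at hd
      exact ⟨hkl, by unfold dblP; rw [hlow, hd]; rfl⟩
  have hlen : m.length ≤ m.length := le_refl _
  rw [scanRuns_eq m.length m hlen hpair 0]
  unfold altSpec specFn
  rw [← any_ofList_iff l m (badP l) (badS m) hbadiff,
    ← countP_ofList_iff l m (dblP l) (dblS m) hdbliff]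
  simp

-- ===== VERDICT (by name: the statement is the Claim_ definition above) =====
theorem part2_spec : Claim_equal_part2 := by
  intro path b _
  unfold Spec_part2
  rw [part2_eq_specFn, part2_alt_eq_specFn]
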